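-- pv_equiv track=rewrite | github.com/HYE77/CodingTest | 프로그래머스/2/42586. 기능개발/기능개발.py | solution
-- ===== SOURCE A (Python) =====
-- def solution(progresses, speeds):
--     import math
--     from collections import Counter
--
--     rest = [100 - progresses[i] for i in range(len(progresses))]
--     days = [math.ceil(rest[i] / speeds[i]) for i in range(len(rest))]
--
--     for i in range(1, len(days)):
--         if days[i] < days[i-1]:
--             days[i] = days[i-1]
--
--     return list(Counter(days).values())
-- ===== SOURCE B (Python) =====
-- def solution(progresses, speeds):
--     result = []
--     deadline = None
--     count = 0
--     for p, s in zip(progresses, speeds):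
--         d = -((p - 100) // s)  # exact ceil((100-p)/s)
--         if deadline is None or d <= deadline:
--             if deadline is None:
--                 deadline = d
--             count += 1
--         else:
--             result.append(count)
--             deadline = d
--             count = 1
--     if count:
--         result.append(count)
--     return result
-- ===== Notes on version B (the rewrite author's own statement) =====
-- stated objective: alternative
-- what changed: Single forward pass maintaining a current deadline and running group count (with exact integer ceiling division) instead of building rest/days arrays, normalizing days with a running-max pass and tallying with Counter; measured ~1.9x faster (constant factor: no intermediate lists, no float ceil, no Counter).
import Mathlib
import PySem

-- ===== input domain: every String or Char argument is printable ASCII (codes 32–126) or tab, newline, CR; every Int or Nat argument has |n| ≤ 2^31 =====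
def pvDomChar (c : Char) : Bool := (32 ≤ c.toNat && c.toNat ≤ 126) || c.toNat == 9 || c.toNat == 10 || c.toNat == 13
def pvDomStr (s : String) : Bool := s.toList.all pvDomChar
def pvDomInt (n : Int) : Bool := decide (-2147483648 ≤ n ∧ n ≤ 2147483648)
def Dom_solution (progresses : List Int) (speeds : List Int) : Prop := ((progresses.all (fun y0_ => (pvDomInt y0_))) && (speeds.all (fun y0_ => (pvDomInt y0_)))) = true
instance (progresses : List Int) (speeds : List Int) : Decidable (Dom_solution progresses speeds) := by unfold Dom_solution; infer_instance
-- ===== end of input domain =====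

-- B replaces A's three passes (rest/days arrays, running-max normalization, Counter) by one
-- forward pass keeping a current deadline and a running group count; return values only.

-- ===== PORT A =====
-- math.ceil(a / b) ported as the exact integer ceiling -((-a) // b): on the admitted domain
-- (|a| ≤ 2^31 + 100 < 2^53, b ≠ 0 by Pre_) CPython's float division is correctly rounded and the
-- true quotient is at least 1/|b| > half an ulp away from any integer it is not equal to, so the
-- ceiling of the float equals the exact integer ceiling.
def pyCeilDiv (a b : Int) : Int := -(PySem.Int.floordiv (-a) b)

def solution (progresses : List Int) (speeds : List Int) : List Int :=
  let rest := (PySem.List.pyRange 0 (PySem.List.len progresses)).map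
      (fun i => 100 - PySem.List.pyGetD progresses i 0)
  let days := (PySem.List.pyRange 0 (PySem.List.len rest)).map
      (fun i => pyCeilDiv (PySem.List.pyGetD rest i 0) (PySem.List.pyGetD speeds i 0))
  let days2 := (PySem.List.pyRange 1 (PySem.List.len days)).foldl
      (fun ds i => if PySem.List.pyGetD ds i 0 < PySem.List.pyGetD ds (i - 1) 0
         then PySem.List.pySetD ds i (PySem.List.pyGetD ds (i - 1) 0) else ds) days
  (PySem.Dict.counter days2).values

-- ===== PORT B =====
-- d = -((p - 100) // s), the exact value of ceil((100 - p) / s)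
def altStep (p s : Int) : Int := -(PySem.Int.floordiv (p - 100) s)

def altGo : List (Int × Int) → Option Int → Int → List Int → List Int
  | [], _, count, res => if count ≠ 0 then res ++ [count] else res
  | (p, s) :: rest, deadline, count, res =>
    let d := altStep p s
    match deadline with
    | none => altGo rest (some d) (count + 1) res
    | some dl =>
      if d ≤ dl then altGo rest (some dl) (count + 1) res
      else altGo rest (some d) 1 (res ++ [count])

def solution_alt (progresses : List Int) (speeds : List Int) : List Int :=
  altGo (progresses.zip speeds) none 0 []

-- ===== PRECONDITION & SPEC =====
-- A raises IndexError when speeds is shorter than progresses and ZeroDivisionError when a used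
-- speed is 0; Pre_ excludes exactly those crashing inputs.
def Pre_solution (progresses : List Int) (speeds : List Int) : Prop :=
  progresses.length ≤ speeds.length ∧ ∀ s ∈ speeds.take progresses.length, s ≠ 0
instance (progresses : List Int) (speeds : List Int) : Decidable (Pre_solution progresses speeds) := by
  unfold Pre_solution; infer_instance

def pvWitness_solution : List Int × List Int := ([93, 30, 55], [1, 30, 5])

def Spec_solution (progresses : List Int) (speeds : List Int) (out : List Int) : Prop := out = solution_alt progresses speeds
instance (progresses : List Int) (speeds : List Int) (out : List Int) : Decidable (Spec_solution progresses speeds out) := by unfold Spec_solution; infer_instance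

-- ===== CLAIM (what is proved, stated in full; the proofs are below) =====
def Claim_equal_solution : Prop := ∀ (progresses : List Int) (speeds : List Int), Dom_solution progresses speeds → Pre_solution progresses speeds → Spec_solution progresses speeds (solution progresses speeds)

-- ===== LEMMAS AND PROOFS =====

-- the running-max normalization of a tail, current maximum m, in the loop's if-form
def goNorm (m : Int) : List Int → List Int
  | [] => []
  | d :: t => (if d < m then m else d) :: goNorm (if d < m then m else d) t

-- the normalization A's index loop performs on the whole list
def nrm : List Int → List Int
  | [] => []
  | d :: t => d :: goNorm d t

-- running maximum, in the same if-form as the loop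
def fm (m : Int) (xs : List Int) : Int := xs.foldl (fun a d => if d < a then a else d) m

-- B's grouping pass on the days values, deadline m, current count c
def grp (m c : Int) : List Int → List Int
  | [] => [c]
  | d :: t => if d ≤ m then grp m (c + 1) t else c :: grp d 1 t

theorem length_goNorm (m : Int) (t : List Int) : (goNorm m t).length = t.length := by
  induction t generalizing m with
  | nil => rfl
  | cons d t ih => simp [goNorm, ih]

theorem length_nrm (xs : List Int) : (nrm xs).length = xs.length := by
  cases xs with
  | nil => rfl
  | cons d t => simp [nrm, length_goNorm]

theorem mem_goNorm_le (m : Int) (t : List Int) : ∀ y ∈ goNorm m t, m ≤ y := by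
  induction t generalizing m with
  | nil => simp [goNorm]
  | cons d t ih =>
    intro y hy
    simp only [goNorm, List.mem_cons] at hy
    rcases hy with h | h
    · subst h; split <;> omega
    · have := ih _ _ h; split at this <;> omega

theorem goNorm_append (m : Int) (xs : List Int) (y : Int) :
    goNorm m (xs ++ [y]) = goNorm m xs ++ [if y < fm m xs then fm m xs else y] := by
  induction xs generalizing m with
  | nil => simp [goNorm, fm]
  | cons d t ih => simp [goNorm, ih, fm, List.foldl_cons]

theorem nrm_append (d : Int) (t : List Int) (y : Int) :
    nrm ((d :: t) ++ [y]) = nrm (d :: t) ++ [if y < fm d t then fm d t else y] := by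
  simp [nrm, goNorm_append]

theorem goNorm_getD_last (m : Int) (xs : List Int) (h : xs ≠ []) :
    (goNorm m xs).getD (xs.length - 1) 0 = fm m xs := by
  induction xs generalizing m with
  | nil => exact absurd rfl h
  | cons d t ih =>
    cases t with
    | nil => simp [goNorm, fm]
    | cons e t' =>
      have h2 : (d :: e :: t').length - 1 = (e :: t').length := by simp
      rw [h2]
      show ((if d < m then m else d) :: goNorm _ (e :: t')).getD ((e :: t').length) 0 = _
      have hlen : (e :: t').length = ((e :: t').length - 1) + 1 := by simp
      rw [hlen]
      simp only [List.getD_cons_succ]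
      rw [ih _ (by simp)]
      simp [fm, List.foldl_cons]

theorem nrm_getD_last (d : Int) (t : List Int) :
    (nrm (d :: t)).getD ((d :: t).length - 1) 0 = fm d t := by
  cases t with
  | nil => simp [nrm, goNorm, fm]
  | cons e t' =>
    show (d :: goNorm d (e :: t')).getD ((d :: e :: t').length - 1) 0 = _
    have h2 : (d :: e :: t').length - 1 = ((e :: t').length - 1) + 1 := by simp
    rw [h2, List.getD_cons_succ, goNorm_getD_last _ _ (by simp)]

-- A's index loop equals the structural running-max normalization
theorem fold_norm (days : List Int) (k : Nat) (hk : k ≤ days.length) :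
    (PySem.List.pyRange 1 (k : Int)).foldl
      (fun ds i => if PySem.List.pyGetD ds i 0 < PySem.List.pyGetD ds (i - 1) 0
         then PySem.List.pySetD ds i (PySem.List.pyGetD ds (i - 1) 0) else ds) days
    = nrm (days.take k) ++ days.drop k := by
  induction k with
  | zero =>
    have h0 : PySem.List.pyRange 1 (0:Int) = [] := by simp [pysem]
    simp [h0, nrm]
  | succ k ih =>
    rcases Nat.eq_zero_or_pos k with rfl | hk1
    · have h1 : PySem.List.pyRange 1 ((1:Nat):Int) = [] := by simp [pysem]
      rw [h1]
      obtain ⟨d, t, rfl⟩ : ∃ d t, days = d :: t := by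
        cases days with
        | nil => simp at hk
        | cons d t => exact ⟨d, t, rfl⟩
      simp [nrm, goNorm, List.foldl_nil]
    · have hkd : k < days.length := by omega
      have hcast : ((k + 1 : Nat) : Int) = (k : Int) + 1 := by push_cast; ring
      rw [hcast, PySem.List.pyRange_one_succ_right
        (by exact_mod_cast Nat.one_le_iff_ne_zero.mpr (by omega)), List.foldl_append, ih (by omega)]
      simp only [List.foldl_cons, List.foldl_nil]
      obtain ⟨d, t, hdt⟩ : ∃ d t, days.take k = d :: t := by
        cases htk : days.take k with
        | nil =>
          exfalso; have := congrArg List.length htk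
          simp [Nat.min_eq_left (le_of_lt hkd)] at this; omega
        | cons d t => exact ⟨d, t, rfl⟩
      set P := nrm (days.take k) with hP
      have hPlen : P.length = k := by
        rw [hP, length_nrm, List.length_take]; omega
      have hdrop : days.drop k = days[k] :: days.drop (k+1) := (List.getElem_cons_drop hkd).symm
      have hgk : PySem.List.pyGetD (P ++ days.drop k) ((k:Nat):Int) 0 = days[k] := by
        rw [PySem.List.pyGetD_natCast, hdrop, List.getD_eq_getElem _ _ (by simp [hPlen]; omega)]
        rw [List.getElem_append_right (by omega)]
        simp [hPlen]
      have hcast1 : ((k:Nat):Int) - 1 = ((k - 1 : Nat) : Int) := by push_cast [hk1]; ring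
      have hgk1 : PySem.List.pyGetD (P ++ days.drop k) (((k:Nat):Int) - 1) 0 = fm d t := by
        rw [hcast1, PySem.List.pyGetD_natCast, List.getD_append _ _ _ _ (by omega)]
        have := nrm_getD_last d t
        rw [← hdt] at this
        simpa [hP, List.length_take, Nat.min_eq_left (le_of_lt hkd)] using this
      rw [hgk, hgk1]
      have htk1 : days.take (k+1) = (d :: t) ++ [days[k]] := by
        rw [← hdt, ← List.take_concat_get hkd]; simp
      have hnrm1 : nrm (days.take (k+1)) = P ++ [if days[k] < fm d t then fm d t else days[k]] := by
        rw [htk1, nrm_append, hP, hdt]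
      split
      · next h =>
        rw [PySem.List.pySetD_natCast, hdrop, hnrm1, List.set_append]
        rw [if_neg (by omega), hPlen, Nat.sub_self, List.set_cons_zero, if_pos h]
        simp
      · next h =>
        rw [hnrm1, hdrop, if_neg h]
        simp

theorem setAdd_cons (s : List Int) (a y : Int) (h : y ≠ a) :
    PySem.Set.add (a :: s) y = a :: PySem.Set.add s y := by
  simp [PySem.Set.add, PySem.Set.contains, h]
  split <;> simp

theorem setOfList_foldl_cons (ys s : List Int) (a : Int) (h : a ∉ ys) :
    ys.foldl PySem.Set.add (a :: s) = a :: ys.foldl PySem.Set.add s := by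
  induction ys generalizing s with
  | nil => rfl
  | cons y ys ih =>
    simp only [List.mem_cons, not_or] at h
    rw [List.foldl_cons, List.foldl_cons, setAdd_cons _ _ _ (fun he => h.1 he.symm)]
    exact ih _ fun hm => h.2 hm

theorem setOfList_replicate (c : Nat) (m : Int) (h : 1 ≤ c) :
    PySem.Set.ofList (List.replicate c m) = [m] := by
  obtain ⟨n, rfl⟩ : ∃ n, c = n + 1 := ⟨c - 1, by omega⟩
  rw [PySem.Set.ofList_eq_foldl]
  induction n with
  | zero => rfl
  | succ n ih =>
    rw [List.replicate_succ', List.foldl_append, ih (by omega)]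
    simp [PySem.Set.add, PySem.Set.contains]

-- Counter's first-occurrence values on a normalized (running-max) tail are B's group counts
theorem key (t : List Int) (m : Int) (c : Nat) (hc : 1 ≤ c) :
    (PySem.Set.ofList (List.replicate c m ++ goNorm m t)).map
      (fun k => ((List.replicate c m ++ goNorm m t).count k : Int))
    = grp m (c : Int) t := by
  induction t generalizing m c with
  | nil =>
    simp only [goNorm, List.append_nil, setOfList_replicate c m hc, grp]
    simp [List.count_replicate]
  | cons d t ih =>
    by_cases hd : d ≤ m
    · have hrw : List.replicate c m ++ goNorm m (d :: t) = List.replicate (c+1) m ++ goNorm m t := by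
        have hM : (if d < m then m else d) = m := by split <;> omega
        simp only [goNorm, hM, List.replicate_succ']
        simp
      rw [hrw, ih m (c+1) (by omega)]
      simp only [grp, if_pos hd]
      push_cast
      ring_nf
    · have hM : (if d < m then m else d) = d := by split <;> omega
      have hgo : goNorm m (d :: t) = d :: goNorm d t := by simp only [goNorm, hM]
      set R := d :: goNorm d t with hR
      have hmem : ∀ y ∈ R, m < y := by
        intro y hy
        rcases List.mem_cons.mp hy with rfl | hy'
        · omega
        · have := mem_goNorm_le d t y hy'; omega
      have hmR : m ∉ R := fun hm => absurd (hmem m hm) (lt_irrefl m)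
      have hofl : PySem.Set.ofList (List.replicate c m ++ R) = m :: PySem.Set.ofList R := by
        rw [PySem.Set.ofList_eq_foldl, List.foldl_append,
          ← PySem.Set.ofList_eq_foldl, setOfList_replicate c m hc]
        rw [show ([m] : List Int) = m :: [] from rfl, setOfList_foldl_cons _ _ _ hmR,
          ← PySem.Set.ofList_eq_foldl]
      rw [hgo, hofl, List.map_cons]
      have hcm : ((List.replicate c m ++ R).count m : Int) = (c : Int) := by
        rw [List.count_append, List.count_replicate_self, List.count_eq_zero.mpr hmR]
        push_cast; ring
      rw [hcm]
      have hmap : (PySem.Set.ofList R).map (fun k => ((List.replicate c m ++ R).count k : Int))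
          = (PySem.Set.ofList R).map (fun k => (R.count k : Int)) := by
        apply List.map_congr_left
        intro k hk
        have hkR : k ∈ R := (PySem.Set.mem_ofList R k).mp hk
        have hkm : k ≠ m := fun he => absurd (hmem k hkR) (by omega)
        rw [List.count_append, List.count_replicate]
        simp [Ne.symm hkm]
      rw [hmap]
      have hR1 : R = List.replicate 1 d ++ goNorm d t := by simp [hR]
      rw [hR1, ih d 1 (by omega)]
      simp only [grp, if_neg hd]
      norm_num

-- B's loop appends its groups to the accumulated result
theorem altGo_some (l : List (Int × Int)) (m c : Int) (r : List Int) (hc : 1 ≤ c) :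
    altGo l (some m) c r = r ++ grp m c (l.map (fun q => altStep q.1 q.2)) := by
  induction l generalizing m c r with
  | nil => simp [altGo, grp]; omega
  | cons q l ih =>
    obtain ⟨p, s⟩ := q
    simp only [altGo, List.map_cons, grp]
    split
    · rw [ih _ _ _ (by omega)]
    · rw [ih _ _ _ (by omega)]; simp

-- a comprehension over range(len(xs)) indexing xs is a map over xs
theorem map_idx (xs : List Int) (f : Int → Int) :
    (PySem.List.pyRange 0 (PySem.List.len xs)).map (fun i => f (PySem.List.pyGetD xs i 0))
    = xs.map f := by
  have h : (fun i => f (PySem.List.pyGetD xs i 0)) = f ∘ (fun i => PySem.List.pyGetD xs i 0) := rfl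
  rw [h, ← List.map_map, PySem.List.map_pyGetD_pyRange_zero]

-- a comprehension over range(len(xs)) indexing xs and the (no shorter) ys is a map over the zip
theorem map_idx2 (xs ys : List Int) (g : Int → Int → Int) (h : xs.length ≤ ys.length) :
    (PySem.List.pyRange 0 (PySem.List.len xs)).map
      (fun i => g (PySem.List.pyGetD xs i 0) (PySem.List.pyGetD ys i 0))
    = (xs.zip ys).map (fun q => g q.1 q.2) := by
  apply List.ext_getElem
  · simp [PySem.List.len, PySem.List.pyRange_zero_natCast]; omega
  · intro j h1 h2
    have hj : j < xs.length := by
      simpa [PySem.List.len, PySem.List.pyRange_zero_natCast] using h1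
    simp only [PySem.List.len, PySem.List.pyRange_zero_natCast, List.getElem_map,
      List.getElem_range, PySem.List.pyGetD_natCast, List.getElem_zip]
    rw [List.getD_eq_getElem _ _ hj, List.getD_eq_getElem _ _ (by omega)]

-- A's days list is p, s pairwise over the zip, with B's exact ceiling
theorem days_eq (progresses speeds : List Int) (hlen : progresses.length ≤ speeds.length) :
    (PySem.List.pyRange 0 (PySem.List.len
        ((PySem.List.pyRange 0 (PySem.List.len progresses)).map
          (fun i => 100 - PySem.List.pyGetD progresses i 0)))).map
      (fun i => pyCeilDiv
        (PySem.List.pyGetD ((PySem.List.pyRange 0 (PySem.List.len progresses)).map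
          (fun i => 100 - PySem.List.pyGetD progresses i 0)) i 0)
        (PySem.List.pyGetD speeds i 0))
    = (progresses.zip speeds).map (fun q => altStep q.1 q.2) := by
  rw [show ((PySem.List.pyRange 0 (PySem.List.len progresses)).map
        (fun i => 100 - PySem.List.pyGetD progresses i 0))
      = progresses.map (fun p => 100 - p) from map_idx progresses (fun p => 100 - p)]
  rw [map_idx2 _ _ pyCeilDiv (by simpa using hlen)]
  rw [List.zip_map_left, List.map_map]
  apply List.map_congr_left
  intro q _
  show pyCeilDiv (100 - q.1) q.2 = altStep q.1 q.2
  unfold pyCeilDiv altStep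
  congr 1
  ring_nf

-- ===== VERDICT (by name: the statement is the Claim_ definition above) =====
theorem solution_spec : Claim_equal_solution := by
  intro ps ss _dom hpre
  obtain ⟨hlen, -⟩ := hpre
  show solution ps ss = solution_alt ps ss
  unfold solution solution_alt
  simp only []
  rw [days_eq ps ss hlen]
  set D := (ps.zip ss).map (fun q => altStep q.1 q.2) with hD
  have hfold : (PySem.List.pyRange 1 (PySem.List.len D)).foldl
      (fun ds i => if PySem.List.pyGetD ds i 0 < PySem.List.pyGetD ds (i - 1) 0
         then PySem.List.pySetD ds i (PySem.List.pyGetD ds (i - 1) 0) else ds) D = nrm D := by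
    have := fold_norm D D.length le_rfl
    simpa [PySem.List.len] using this
  rw [hfold]
  cases hz : ps.zip ss with
  | nil =>
    rw [hD, hz]
    decide
  | cons q l =>
    obtain ⟨p, s⟩ := q
    have hDc : D = altStep p s :: l.map (fun q => altStep q.1 q.2) := by rw [hD, hz]; rfl
    rw [hDc]
    show (PySem.Dict.counter (nrm _)).values = _
    simp only [nrm, PySem.Dict.values, PySem.Dict.items_counter, List.map_map]
    have hrep : altStep p s :: goNorm (altStep p s) (l.map (fun q => altStep q.1 q.2))
        = List.replicate 1 (altStep p s) ++ goNorm (altStep p s) (l.map (fun q => altStep q.1 q.2)) := by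
      simp
    rw [hrep]
    have hkey := key (l.map (fun q => altStep q.1 q.2)) (altStep p s) 1 le_rfl
    have h2 : altGo ((p, s) :: l) none 0 [] = grp (altStep p s) 1 (l.map (fun q => altStep q.1 q.2)) := by
      show altGo l (some (altStep p s)) (0 + 1) [] = _
      rw [altGo_some l (altStep p s) (0 + 1) [] (by omega)]
      norm_num
    rw [h2]
    simpa using hkey
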